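-- pv_equiv track=rewrite | github.com/ergemp/python_challanges | treasure_hunter/run.py | treasure_finder
-- ===== SOURCE A (Python) =====
-- def treasure_finder(gll):
--     map_final = []
--     row_final = []
--     for elem1 in gll:
--
--         if len(elem1) == 0:
--             return 0
--
--         row_total = 0
--         for elem2 in elem1:
--             if elem2 > 0:
--                 row_total = row_total + elem2
--             elif elem2 == 0:
--                 row_final.append(row_total)
--                 row_total = 0
--             elif elem2 < 0:
--                 return -1
--
--             row_final.append(row_total)
--
--         map_final.append(max(row_final))
--     return max(map_final)
-- ===== SOURCE B (Python) =====
-- def seg_max(row):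
--     # max segment sum of a row of non-negative ints, segments delimited by zeros
--     if 0 in row:
--         i = row.index(0)
--         return max(sum(row[:i]), seg_max(row[i + 1:]))
--     return sum(row)
--
--
-- def treasure_finder(gll):
--     for row in gll:
--         if not row:
--             return 0
--         if any(x < 0 for x in row):
--             return -1
--     return max(seg_max(row) for row in gll)
-- ===== Notes on version B (the rewrite author's own statement) =====
-- stated objective: alternative
-- what changed: B stages the work: a first validation scan handles the early returns (empty row -> 0, negative -> -1), then a recursive divide-and-conquer seg_max splits each row at its first zero (max(sum(prefix), seg_max(rest))) and the answer is max over rows, replacing A's single interleaved scan with its shared row_final list, running totals and per-row max() rescans.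
import Mathlib
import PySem

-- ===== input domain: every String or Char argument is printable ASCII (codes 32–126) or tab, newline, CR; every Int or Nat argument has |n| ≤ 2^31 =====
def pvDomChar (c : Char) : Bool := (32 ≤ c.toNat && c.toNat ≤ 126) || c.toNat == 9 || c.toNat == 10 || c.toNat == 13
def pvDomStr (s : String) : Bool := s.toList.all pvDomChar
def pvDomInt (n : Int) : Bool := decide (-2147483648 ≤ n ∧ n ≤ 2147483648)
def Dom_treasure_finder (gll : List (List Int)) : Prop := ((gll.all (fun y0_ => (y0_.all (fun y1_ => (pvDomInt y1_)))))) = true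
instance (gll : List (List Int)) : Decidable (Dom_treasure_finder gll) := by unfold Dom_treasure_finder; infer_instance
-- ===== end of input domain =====

-- B replaces A's interleaved scan (shared row_final list, running totals, early returns inside the
-- numeric loop) by two staged passes: a validation scan (empty row → 0, negative → -1) followed by a
-- pure divide-and-conquer seg_max that splits each row at its first zero (objective: alternative).

-- ===== PORT A =====
-- inner loop of A over one row: state (row_total, row_final); .inl v = early return v (only -1 here)
def tfAInner : List Int → Int → List Int → Sum Int (Int × List Int)
  | [], t, rf => .inr (t, rf)
  | x :: xs, t, rf =>
    if x > 0 then tfAInner xs (t + x) (rf ++ [t + x])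
    else if x = 0 then tfAInner xs 0 ((rf ++ [t]) ++ [0])
    else .inl (-1)

-- outer loop of A: state (map_final, row_final); max([]) raises in Python, Pre_ excludes gll = []; getD 0 is unreachable under Pre_
def tfAOuter : List (List Int) → List Int → List Int → Int
  | [], mf, _ => (PySem.List.max? mf (fun y => y)).getD 0
  | row :: rest, mf, rf =>
    if row.length = 0 then 0
    else
      match tfAInner row 0 rf with
      | .inl v => v
      | .inr (_, rf') => tfAOuter rest (mf ++ [(PySem.List.max? rf' (fun y => y)).getD 0]) rf'

def treasure_finder (gll : List (List Int)) : Int := tfAOuter gll [] []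

-- ===== PORT B =====
-- seg_max(row): split at the first zero — max(sum(row[:i]), seg_max(row[i+1:])); sum(row) if no zero.
-- The `| none => 0` branch is unreachable: it is guarded by `0 in row`.
def segMax (row : List Int) : Int :=
  if _h : (0 : Int) ∈ row then
    match hi : PySem.List.index? row 0 with
    | some i =>
        max (PySem.List.slice row none (some (i : Int))).sum
            (segMax (PySem.List.slice row (some ((i : Int) + 1)) none))
    | none => 0
  else row.sum
termination_by row.length
decreasing_by
  obtain ⟨hk, -, -⟩ := PySem.List.getElem_of_index?_eq_some hi
  rw [show ((i : Int) + 1) = ((i + 1 : Nat) : Int) by push_cast; ring,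
      PySem.List.slice_from_natCast]
  simp [List.length_drop]
  omega

-- validation pass of B: first early return in row order (empty row → 0, row with a negative → -1)
def tfValidate : List (List Int) → Option Int
  | [] => none
  | row :: rest =>
    if row.isEmpty then some 0
    else if row.any (fun x => decide (x < 0)) then some (-1)
    else tfValidate rest

-- max(seg_max(row) for row in gll); max() on the empty gll raises in Python, Pre_ excludes it
def treasure_finder_alt (gll : List (List Int)) : Int :=
  match tfValidate gll with
  | some v => v
  | none => (PySem.List.max? (gll.map segMax) (fun y => y)).getD 0

-- ===== PRECONDITION & SPEC =====
-- Pre_ excludes only the empty outer list, on which Python A raises ValueError (max of an empty sequence)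
def Pre_treasure_finder (gll : List (List Int)) : Prop := gll ≠ []
instance (gll : List (List Int)) : Decidable (Pre_treasure_finder gll) := by unfold Pre_treasure_finder; infer_instance
def pvWitness_treasure_finder : List (List Int) := [[1, 2, 0, 3], [4]]

def Spec_treasure_finder (gll : List (List Int)) (out : Int) : Prop := out = treasure_finder_alt gll
instance (gll : List (List Int)) (out : Int) : Decidable (Spec_treasure_finder gll out) := by unfold Spec_treasure_finder; infer_instance

-- ===== CLAIM (what is proved, stated in full; the proofs are below) =====
def Claim_equal_treasure_finder : Prop := ∀ (gll : List (List Int)), Dom_treasure_finder gll → Pre_treasure_finder gll → Spec_treasure_finder gll (treasure_finder gll)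

-- ===== LEMMAS AND PROOFS =====

-- Python max(l) as an Option, identity key
def tfM (l : List Int) : Option Int := PySem.List.max? l (fun y => y)

-- max of a value against an optional running max / merge of an optional max into one
def tfOMax (a : Int) : Option Int → Int
  | none => a
  | some b => max a b

def tfOComb : Option Int → Option Int → Option Int
  | none, acc => acc
  | some m, acc => some (tfOMax m acc)

-- maximum of the values A's inner loop appends to row_final, started at running total t
-- (defined for rows of non-negative elements: the branches are x = 0 and x > 0)
def tfApmax : Int → List Int → Option Int
  | _, [] => none
  | t, x :: xs =>
    some (if x = 0 then tfOMax (max t 0) (tfApmax 0 xs) else tfOMax (t + x) (tfApmax (t + x) xs))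

-- A's running max over the rows, seeded with the max of the inherited row_final
def tfMfold : List (List Int) → Option Int → Option Int
  | [], acc => acc
  | row :: rest, acc => tfMfold rest (tfOComb (tfApmax 0 row) acc)

theorem tfM_append (l : List Int) (y : Int) :
    tfM (l ++ [y]) = some (tfOMax y (tfM l)) := by
  cases l with
  | nil => simp [tfM, tfOMax, PySem.List.max?]
  | cons x t =>
    simp [tfM, tfOMax, PySem.List.max?_id_cons, List.foldl_append, max_comm]

theorem tfShift (v : Int) (o acc : Option Int) :
    tfOComb o (some (tfOMax v acc)) = some (tfOMax (tfOMax v o) acc) := by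
  cases o <;> cases acc <;> simp [tfOComb, tfOMax] <;> omega

-- a negative element makes A's inner loop return -1
theorem tfAInner_neg (row : List Int) (hneg : ∃ x ∈ row, x < 0) (t : Int) (rf : List Int) :
    tfAInner row t rf = .inl (-1) := by
  induction row generalizing t rf with
  | nil => obtain ⟨x, hx, -⟩ := hneg; simp at hx
  | cons x xs ih =>
    obtain ⟨y, hy, hylt⟩ := hneg
    by_cases hx : x < 0
    · simp only [tfAInner]
      rw [if_neg (by omega), if_neg (by omega)]
    · have hy' : y ∈ xs := by
        rcases List.mem_cons.mp hy with h | h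
        · omega
        · exact h
      by_cases hz : x = 0
      · simp only [tfAInner]
        rw [if_neg (by omega), if_pos hz]
        exact ih ⟨y, hy', hylt⟩ _ _
      · simp only [tfAInner]
        rw [if_pos (by omega)]
        exact ih ⟨y, hy', hylt⟩ _ _

-- characterisation of A's inner loop on a non-negative row
theorem tfAInner_char (row : List Int) (hpos : ∀ x ∈ row, 0 ≤ x) :
    ∀ t rf, ∃ t' rf', tfAInner row t rf = .inr (t', rf') ∧
      tfM rf' = tfOComb (tfApmax t row) (tfM rf) := by
  induction row with
  | nil => exact fun t rf => ⟨t, rf, rfl, rfl⟩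
  | cons x xs ih =>
    intro t rf
    have hx : 0 ≤ x := hpos x (by simp)
    have hxs : ∀ y ∈ xs, 0 ≤ y := fun y hy => hpos y (by simp [hy])
    by_cases hz : x = 0
    · subst hz
      obtain ⟨t', rf', heq, hm⟩ := ih hxs 0 ((rf ++ [t]) ++ [0])
      refine ⟨t', rf', ?_, ?_⟩
      · simpa [tfAInner] using heq
      · rw [hm, tfM_append, tfM_append]
        have h1 : tfOMax 0 (some (tfOMax t (tfM rf))) = tfOMax (max 0 t) (tfM rf) := by
          cases tfM rf with
          | none => simp [tfOMax, max_comm]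
          | some b => simp only [tfOMax]; omega
        rw [h1, show max 0 t = max t 0 from max_comm 0 t, tfShift]
        simp [tfApmax, tfOComb]
    · have hx' : 0 < x := by omega
      obtain ⟨t', rf', heq, hm⟩ := ih hxs (t + x) (rf ++ [t + x])
      refine ⟨t', rf', ?_, ?_⟩
      · simp only [tfAInner]
        rw [if_pos hx']
        exact heq
      · rw [hm, tfM_append, tfShift,
            show tfApmax t (x :: xs) = some (tfOMax (t + x) (tfApmax (t + x) xs)) by
              simp [tfApmax, hz]]
        rfl

-- ---- facts about segMax ----

theorem segMax_nil : segMax [] = 0 := by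
  rw [segMax]; simp

theorem segMax_of_not_mem (row : List Int) (h : (0 : Int) ∉ row) : segMax row = row.sum := by
  rw [segMax]; simp [h]

theorem segMax_split (pre tail : List Int) (h : (0 : Int) ∉ pre) :
    segMax (pre ++ 0 :: tail) = max pre.sum (segMax tail) := by
  have hidx : PySem.List.index? (pre ++ 0 :: tail) 0 = some pre.length :=
    (PySem.List.index?_eq_some_iff _ _ _).mpr ⟨pre, tail, rfl, rfl, h⟩
  rw [segMax]
  have hmem : (0 : Int) ∈ pre ++ 0 :: tail := by simp
  rw [dif_pos hmem]
  split
  next i hi =>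
    rw [hidx] at hi
    injection hi with hi
    subst hi
    congr 1
    · rw [PySem.List.slice_to_natCast]
      rw [List.take_left]
    · congr 1
      rw [show ((pre.length : Int) + 1) = ((pre.length + 1 : Nat) : Int) by push_cast; ring,
          PySem.List.slice_from_natCast,
          show pre.length + 1 = (pre ++ [(0 : Int)]).length by simp,
          show pre ++ 0 :: tail = (pre ++ [0]) ++ tail by simp]
      exact List.drop_left
  next hi => rw [hidx] at hi; simp at hi

-- no-zero rows: A's appended maxima are t + sum
theorem tfApmax_no_zero (row : List Int) (h : (0 : Int) ∉ row) (hpos : ∀ x ∈ row, 0 ≤ x) :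
    ∀ t, tfApmax t row = if row = [] then none else some (t + row.sum) := by
  induction row with
  | nil => intro t; rfl
  | cons x xs ih =>
    intro t
    have hx : x ≠ 0 := fun hc => h (by simp [hc])
    have hx0 : 0 ≤ x := hpos x (by simp)
    have hxs : (0 : Int) ∉ xs := fun hc => h (by simp [hc])
    have hxsp : ∀ y ∈ xs, 0 ≤ y := fun y hy => hpos y (by simp [hy])
    have hs : 0 ≤ xs.sum := List.sum_nonneg hxsp
    rw [if_neg (List.cons_ne_nil x xs)]
    by_cases hxe : xs = []
    · subst hxe
      simp [tfApmax, hx, tfOMax]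
    · simp only [tfApmax]
      rw [if_neg hx, ih hxs hxsp (t + x), if_neg hxe]
      simp only [tfOMax, List.sum_cons, Option.some.injEq]
      omega

-- rows with a first zero after prefix pre
theorem tfApmax_split (pre : List Int) (h : (0 : Int) ∉ pre) (hpos : ∀ x ∈ pre, 0 ≤ x)
    (tail : List Int) :
    ∀ t, tfApmax t (pre ++ 0 :: tail) = some (tfOMax (max (t + pre.sum) 0) (tfApmax 0 tail)) := by
  induction pre with
  | nil => intro t; simp [tfApmax]
  | cons y pre' ih =>
    intro t
    have hy : y ≠ 0 := fun hc => h (by simp [hc])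
    have hy0 : 0 ≤ y := hpos y (by simp)
    have hp' : (0 : Int) ∉ pre' := fun hc => h (by simp [hc])
    have hp'p : ∀ x ∈ pre', 0 ≤ x := fun x hx => hpos x (by simp [hx])
    have hs : 0 ≤ pre'.sum := List.sum_nonneg hp'p
    simp only [List.cons_append, tfApmax, hy, if_false, ih hp' hp'p]
    cases tfApmax 0 tail <;> simp [tfOMax, List.sum_cons] <;> omega

-- segMax is what A's inner-loop maxima compute from t = 0, and it is non-negative
theorem segMax_main (n : Nat) : ∀ row : List Int, row.length ≤ n → (∀ x ∈ row, 0 ≤ x) →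
    (tfApmax 0 row = if row = [] then none else some (segMax row)) ∧ 0 ≤ segMax row := by
  induction n with
  | zero =>
    intro row hlen _
    have : row = [] := List.length_eq_zero_iff.mp (by omega)
    subst this
    exact ⟨rfl, by rw [segMax_nil]⟩
  | succ n ih =>
    intro row hlen hpos
    by_cases hmem : (0 : Int) ∈ row
    · obtain ⟨i, hi⟩ := (PySem.List.index?_isSome_iff row 0).mpr hmem |> Option.isSome_iff_exists.mp
      obtain ⟨pre, tail, hrow, -, hpre⟩ := (PySem.List.index?_eq_some_iff _ _ _).mp hi
      subst hrow
      have hprep : ∀ x ∈ pre, 0 ≤ x := fun x hx => hpos x (by simp [hx])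
      have htailp : ∀ x ∈ tail, 0 ≤ x := fun x hx => hpos x (by simp [hx])
      have hps : 0 ≤ pre.sum := List.sum_nonneg hprep
      have htlen : tail.length ≤ n := by
        have := hlen
        simp [List.length_append] at this ⊢
        omega
      obtain ⟨ht1, ht2⟩ := ih tail htlen htailp
      rw [tfApmax_split pre hpre hprep tail 0, segMax_split pre tail hpre]
      refine ⟨?_, by omega⟩
      rw [if_neg (by simp)]
      by_cases hte : tail = []
      · subst hte
        simp only [tfApmax, tfOMax, segMax_nil, zero_add]
      · rw [if_neg hte] at ht1
        rw [ht1]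
        simp only [tfOMax, Option.some.injEq, zero_add]
        omega
    · refine ⟨?_, ?_⟩
      · rw [tfApmax_no_zero row hmem hpos 0]
        cases hre : row with
        | nil => simp
        | cons a l =>
          rw [if_neg (by simp), if_neg (by simp)]
          rw [← hre, segMax_of_not_mem row hmem]
          simp
      · rw [segMax_of_not_mem row hmem]
        exact List.sum_nonneg hpos

-- the validation pass returning some v means A also returns v
theorem tfValidate_some (gll : List (List Int)) (v : Int) (h : tfValidate gll = some v) :
    ∀ mf rf, tfAOuter gll mf rf = v := by
  induction gll with
  | nil => simp [tfValidate] at h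
  | cons row rest ih =>
    intro mf rf
    by_cases he : row.isEmpty
    · have hv : v = 0 := by simp [tfValidate, he] at h; omega
      have : row.length = 0 := by simpa [List.isEmpty_iff_length_eq_zero] using he
      simp [tfAOuter, this, hv]
    · by_cases hneg : row.any (fun x => decide (x < 0))
      · have hv : v = -1 := by simp [tfValidate, he, hneg] at h; omega
        have hex : ∃ x ∈ row, x < 0 := by simpa using hneg
        have hlen : ¬ row.length = 0 := by
          simp [List.isEmpty_iff] at he; simp [he]
        simp only [tfAOuter]
        rw [if_neg hlen, tfAInner_neg row hex 0 rf, hv]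
      · have hrest : tfValidate rest = some v := by simpa [tfValidate, he, hneg] using h
        have hpos : ∀ x ∈ row, 0 ≤ x := by
          intro x hx
          by_contra hc
          exact hneg (List.any_eq_true.mpr ⟨x, hx, by simp; omega⟩)
        have hlen : ¬ row.length = 0 := by
          simp [List.isEmpty_iff] at he; simp [he]
        obtain ⟨t', rf', heq, -⟩ := tfAInner_char row hpos 0 rf
        simp only [tfAOuter]
        rw [if_neg hlen, heq]
        exact ih hrest _ _

-- the validation pass returning none means every row is nonempty with non-negative elements
theorem tfValidate_none (gll : List (List Int)) (h : tfValidate gll = none) :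
    ∀ row ∈ gll, row ≠ [] ∧ ∀ x ∈ row, 0 ≤ x := by
  induction gll with
  | nil => simp
  | cons row rest ih =>
    by_cases he : row.isEmpty
    · simp [tfValidate, he] at h
    · by_cases hneg : row.any (fun x => decide (x < 0))
      · simp [tfValidate, he, hneg] at h
      · have hrest : tfValidate rest = none := by simpa [tfValidate, he, hneg] using h
        intro r hr
        rcases List.mem_cons.mp hr with hr | hr
        · subst hr
          refine ⟨by simpa [List.isEmpty_iff] using he, ?_⟩
          intro x hx
          by_contra hc
          exact hneg (List.any_eq_true.mpr ⟨x, hx, by simp; omega⟩)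
        · exact ih hrest r hr

-- A's outer loop on a validated gll computes the fold of the per-row maxima
theorem tfAOuter_char (gll : List (List Int)) (hok : ∀ row ∈ gll, row ≠ [] ∧ ∀ x ∈ row, 0 ≤ x) :
    ∀ mf rf, tfM mf = tfM rf → tfAOuter gll mf rf = (tfMfold gll (tfM rf)).getD 0 := by
  induction gll with
  | nil =>
    intro mf rf hm
    simp only [tfAOuter, tfMfold]
    rw [show PySem.List.max? mf (fun y => y) = tfM mf from rfl, hm]
  | cons row rest ih =>
    intro mf rf hm
    obtain ⟨hne, hpos⟩ := hok row (by simp)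
    have hok' : ∀ r ∈ rest, r ≠ [] ∧ ∀ x ∈ r, 0 ≤ x := fun r hr => hok r (by simp [hr])
    have hlen : ¬ row.length = 0 := by simp [hne]
    obtain ⟨t', rf', heq, hmax⟩ := tfAInner_char row hpos 0 rf
    obtain ⟨m, hap⟩ : ∃ m, tfApmax 0 row = some m := by
      cases hre : row with
      | nil => exact absurd hre hne
      | cons a l => exact ⟨_, rfl⟩
    have hrf' : tfM rf' = some (tfOMax m (tfM rf)) := by rw [hmax, hap]; rfl
    have hmf' : tfM (mf ++ [(tfM rf').getD 0]) = tfM rf' := by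
      rw [tfM_append, hm, hrf']
      cases tfM rf with
      | none => simp [tfOMax]
      | some b => simp only [tfOMax, Option.getD_some, Option.some.injEq]; omega
    simp only [tfAOuter]
    rw [if_neg hlen, heq]
    show tfAOuter rest (mf ++ [(tfM rf').getD 0]) rf' = (tfMfold (row :: rest) (tfM rf)).getD 0
    rw [ih hok' _ _ hmf', hmax]
    simp only [tfMfold]

-- the fold of the per-row maxima is B's max over the seg_max values
theorem tfMfold_char (gll : List (List Int)) (hok : ∀ row ∈ gll, row ≠ [] ∧ ∀ x ∈ row, 0 ≤ x) :
    ∀ b, tfMfold gll (some b) = some ((gll.map segMax).foldl max b) := by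
  induction gll with
  | nil => intro b; rfl
  | cons row rest ih =>
    intro b
    obtain ⟨hne, hpos⟩ := hok row (by simp)
    have hok' : ∀ r ∈ rest, r ≠ [] ∧ ∀ x ∈ r, 0 ≤ x := fun r hr => hok r (by simp [hr])
    have hap : tfApmax 0 row = some (segMax row) := by
      obtain ⟨h1, -⟩ := segMax_main row.length row le_rfl hpos
      rwa [if_neg hne] at h1
    simp only [tfMfold, hap, tfOComb, tfOMax, List.map_cons, List.foldl_cons]
    rw [ih hok']
    rw [max_comm b (segMax row)]

-- ===== VERDICT (by name: the statement is the Claim_ definition above) =====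
theorem treasure_finder_spec : Claim_equal_treasure_finder := by
  intro gll _ hpre
  unfold Spec_treasure_finder treasure_finder treasure_finder_alt
  cases hv : tfValidate gll with
  | some v => exact tfValidate_some gll v hv [] []
  | none =>
    have hok := tfValidate_none gll hv
    rw [tfAOuter_char gll hok [] [] rfl]
    cases hge : gll with
    | nil => exact absurd hge hpre
    | cons row rest =>
      subst hge
      obtain ⟨hne, hpos⟩ := hok row (by simp)
      have hok' : ∀ r ∈ rest, r ≠ [] ∧ ∀ x ∈ r, 0 ≤ x := fun r hr => hok r (by simp [hr])
      have hap : tfApmax 0 row = some (segMax row) := by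
        obtain ⟨h1, -⟩ := segMax_main row.length row le_rfl hpos
        rwa [if_neg hne] at h1
      have h1 : tfM [] = (none : Option Int) := rfl
      rw [h1]
      simp only [tfMfold, hap, tfOComb, tfOMax]
      rw [tfMfold_char rest hok' (segMax row)]
      rw [show (row :: rest).map segMax = segMax row :: rest.map segMax from rfl]
      rw [show PySem.List.max? (segMax row :: rest.map segMax) (fun y => y)
            = some ((rest.map segMax).foldl max (segMax row)) from
          PySem.List.max?_id_cons _ _]
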